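-- pv_equiv track=rewrite | github.com/Rohithjeevanantham/ehr_project | ehr_generator.py | aggregate_report_notes
-- ===== SOURCE A (Python) =====
-- def aggregate_report_notes(structured_data):
--     interpretations = []
--     comments = []
--     disclaimers = []
--     quality_control = []
--     for page in structured_data:
--         notes = page.get("Report Notes", {})
--         interpretations.extend(notes.get("Interpretations", []))
--         comments.extend(notes.get("Comments", []))
--         disclaimers.extend(notes.get("Disclaimers", []))
--         quality_control.extend(notes.get("Quality Control", []))
--     return {
--         "Interpretations": interpretations,
--         "Comments": comments,
--         "Disclaimers": disclaimers,
--         "Quality Control": quality_control,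
--     }
-- ===== SOURCE B (Python) =====
-- def aggregate_report_notes(structured_data):
--     pages = list(structured_data)
--     return {
--         key: [x for page in pages
--                 for x in page.get("Report Notes", {}).get(key, [])]
--         for key in ("Interpretations", "Comments", "Disclaimers", "Quality Control")
--     }
-- ===== Notes on version B (the rewrite author's own statement) =====
-- stated objective: idiomatic
-- what changed: Replaces the page-driven single pass maintaining four mutable lists with a dict comprehension over the four category names, each value a flattening comprehension over the materialized pages.
import Mathlib
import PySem

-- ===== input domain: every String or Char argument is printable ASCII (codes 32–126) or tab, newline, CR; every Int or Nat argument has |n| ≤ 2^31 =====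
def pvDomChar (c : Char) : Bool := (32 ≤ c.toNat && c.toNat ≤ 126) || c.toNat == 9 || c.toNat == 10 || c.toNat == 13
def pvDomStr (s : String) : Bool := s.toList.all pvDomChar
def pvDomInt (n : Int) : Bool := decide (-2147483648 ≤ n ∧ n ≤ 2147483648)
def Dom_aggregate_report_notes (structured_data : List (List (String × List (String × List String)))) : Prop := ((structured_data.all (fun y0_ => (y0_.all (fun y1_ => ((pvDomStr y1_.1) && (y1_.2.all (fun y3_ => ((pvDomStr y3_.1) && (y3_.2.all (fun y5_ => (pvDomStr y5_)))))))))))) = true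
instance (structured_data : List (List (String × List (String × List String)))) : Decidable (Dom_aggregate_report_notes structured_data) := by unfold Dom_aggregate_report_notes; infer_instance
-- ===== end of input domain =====

-- B rebuilds the same aggregate with a dict comprehension over the four category names (one flattening pass per key) instead of A's single page loop extending four lists; same cost, idiomatic.


-- ===== PORT A =====
def aggregate_report_notes (structured_data : List (List (String × List (String × List String)))) : List (String × List String) :=
  let st := structured_data.foldl
    (fun (acc : List String × List String × List String × List String) page =>
      let notes := PySem.Dict.getD (PySem.Dict.mk page) "Report Notes" []
      (acc.1 ++ PySem.Dict.getD (PySem.Dict.mk notes) "Interpretations" [],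
       acc.2.1 ++ PySem.Dict.getD (PySem.Dict.mk notes) "Comments" [],
       acc.2.2.1 ++ PySem.Dict.getD (PySem.Dict.mk notes) "Disclaimers" [],
       acc.2.2.2 ++ PySem.Dict.getD (PySem.Dict.mk notes) "Quality Control" []))
    ([], [], [], [])
  [("Interpretations", st.1), ("Comments", st.2.1),
   ("Disclaimers", st.2.2.1), ("Quality Control", st.2.2.2)]

-- ===== PORT B =====
-- [x for page in pages for x in page.get("Report Notes", {}).get(key, [])]
def pvCollect (pages : List (List (String × List (String × List String)))) (key : String) : List String :=
  pages.flatMap (fun page => PySem.Dict.getD (PySem.Dict.mk (PySem.Dict.getD (PySem.Dict.mk page) "Report Notes" [])) key [])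

def aggregate_report_notes_alt (structured_data : List (List (String × List (String × List String)))) : List (String × List String) :=
  ["Interpretations", "Comments", "Disclaimers", "Quality Control"].map
    (fun key => (key, pvCollect structured_data key))

-- ===== PRECONDITION & SPEC =====
def Spec_aggregate_report_notes (structured_data : List (List (String × List (String × List String)))) (out : List (String × List String)) : Prop := out = aggregate_report_notes_alt structured_data
instance (structured_data : List (List (String × List (String × List String)))) (out : List (String × List String)) : Decidable (Spec_aggregate_report_notes structured_data out) := by unfold Spec_aggregate_report_notes; infer_instance

-- ===== CLAIM (what is proved, stated in full; the proofs are below) =====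
def Claim_equal_aggregate_report_notes : Prop := ∀ (structured_data : List (List (String × List (String × List String)))), Dom_aggregate_report_notes structured_data → Spec_aggregate_report_notes structured_data (aggregate_report_notes structured_data)

-- ===== LEMMAS AND PROOFS =====

lemma agg_foldl_inv (sd : List (List (String × List (String × List String))))
    (a b c d : List String) :
    sd.foldl
      (fun (acc : List String × List String × List String × List String) page =>
        let notes := PySem.Dict.getD (PySem.Dict.mk page) "Report Notes" []
        (acc.1 ++ PySem.Dict.getD (PySem.Dict.mk notes) "Interpretations" [],
         acc.2.1 ++ PySem.Dict.getD (PySem.Dict.mk notes) "Comments" [],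
         acc.2.2.1 ++ PySem.Dict.getD (PySem.Dict.mk notes) "Disclaimers" [],
         acc.2.2.2 ++ PySem.Dict.getD (PySem.Dict.mk notes) "Quality Control" []))
      (a, b, c, d)
    = (a ++ pvCollect sd "Interpretations", b ++ pvCollect sd "Comments",
       c ++ pvCollect sd "Disclaimers", d ++ pvCollect sd "Quality Control") := by
  induction sd generalizing a b c d with
  | nil => simp [pvCollect]
  | cons p t ih => simp [List.foldl_cons, ih, pvCollect, List.append_assoc]

-- ===== VERDICT (by name: the statement is the Claim_ definition above) =====
theorem aggregate_report_notes_spec : Claim_equal_aggregate_report_notes := by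
  intro sd _
  unfold Spec_aggregate_report_notes aggregate_report_notes aggregate_report_notes_alt
  simp [agg_foldl_inv]
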